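-- pv_equiv track=rewrite | github.com/PickAim/jarvis_calc | utils/calc_utils.py | sort_by_len_alphabet
-- ===== SOURCE A (Python) =====
-- def sort_by_len_alphabet(names: list[str]) -> list[str]:
--     length_dict: [int, list[str]] = {}
--     for name in names:
--         if not length_dict.__contains__(len(name)):
--             length_dict[len(name)] = [name]
--             continue
--         length_dict[len(name)].append(name)
--     sorted_tuples: list = sorted(length_dict.items())
--     result: list[str] = []
--     for length_tuple in sorted_tuples:
--         result.extend(sorted(length_tuple[1]))
--     return result
-- ===== SOURCE B (Python) =====
-- def sort_by_len_alphabet(names: list[str]) -> list[str]: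
--     return sorted(names, key=lambda s: (len(s), s))
-- ===== Notes on version B (the rewrite author's own statement) =====
-- stated objective: idiomatic
-- what changed: Replaces the length-bucket dictionary plus per-bucket sorts with a single stable sort keyed by the tuple (len(s), s).
import Mathlib
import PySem

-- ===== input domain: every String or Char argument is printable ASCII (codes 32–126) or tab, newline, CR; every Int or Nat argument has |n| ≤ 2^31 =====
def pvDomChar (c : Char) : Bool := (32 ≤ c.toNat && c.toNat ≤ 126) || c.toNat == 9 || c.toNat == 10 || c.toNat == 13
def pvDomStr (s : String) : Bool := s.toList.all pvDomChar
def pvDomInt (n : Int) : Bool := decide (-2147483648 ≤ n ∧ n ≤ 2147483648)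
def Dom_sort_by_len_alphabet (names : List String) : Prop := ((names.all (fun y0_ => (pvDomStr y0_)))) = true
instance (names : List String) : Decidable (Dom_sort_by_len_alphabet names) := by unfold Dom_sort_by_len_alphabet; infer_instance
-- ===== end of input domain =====

-- B replaces A's length-bucket dictionary and per-bucket sorting loop by one stable sort keyed by the tuple (len(s), s); same cost, idiomatic.

-- ===== PORT A =====
def sort_by_len_alphabet (names : List String) : List String :=
  let length_dict : PySem.Dict Int (List String) :=
    names.foldl (fun d name =>
      if d.contains (PySem.Str.len name) = false then
        d.insert (PySem.Str.len name) [name]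
      else
        -- length_dict[len(name)].append(name): in-place append at the key
        d.modify (PySem.Str.len name) [] (fun l => l ++ [name])) PySem.Dict.empty
  -- sorted(length_dict.items()): dict keys are distinct, so Python's tuple comparison is decided by the key alone
  let sorted_tuples := PySem.List.sorted length_dict.items (fun p => p.1) false
  sorted_tuples.foldl (fun result t => result ++ PySem.List.sorted t.2 (fun s => s) false) []

-- ===== PORT B =====
def sort_by_len_alphabet_alt (names : List String) : List String :=
  PySem.List.sorted2 names (fun s => PySem.Str.len s) (fun s => s) false

-- ===== PRECONDITION & SPEC =====
def Spec_sort_by_len_alphabet (names : List String) (out : List String) : Prop := out = sort_by_len_alphabet_alt names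
instance (names : List String) (out : List String) : Decidable (Spec_sort_by_len_alphabet names out) := by unfold Spec_sort_by_len_alphabet; infer_instance

-- ===== CLAIM (what is proved, stated in full; the proofs are below) =====
def Claim_equal_sort_by_len_alphabet : Prop := ∀ (names : List String), Dom_sort_by_len_alphabet names → Spec_sort_by_len_alphabet names (sort_by_len_alphabet names)

-- ===== LEMMAS AND PROOFS =====

-- the composite sort key both programs realise
def pvKey (s : String) : Lex (Int × String) := toLex (PySem.Str.len s, s)

lemma pvKey_inj : Function.Injective pvKey := by
  intro a b h
  exact congrArg (fun p => (ofLex p).2) h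

-- B's port is the stable sort by pvKey
lemma alt_eq_sorted (names : List String) :
    sort_by_len_alphabet_alt names = PySem.List.sorted names pvKey false := by
  have hfun : (fun a b : String =>
        decide (PySem.Str.len a < PySem.Str.len b) ||
          (!decide (PySem.Str.len b < PySem.Str.len a) && decide (a < b)))
      = (fun a b : String => decide (pvKey a < pvKey b)) := by
    funext a b
    have hiff : (PySem.Str.len a < PySem.Str.len b ∨ (¬ PySem.Str.len b < PySem.Str.len a ∧ a < b))
        ↔ pvKey a < pvKey b := by
      simp only [pvKey, Prod.Lex.toLex_lt_toLex]
      constructor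
      · rintro (h | ⟨h, hr⟩)
        · exact Or.inl h
        · rcases lt_trichotomy (PySem.Str.len a) (PySem.Str.len b) with h1 | h1 | h1
          · exact Or.inl h1
          · exact Or.inr ⟨h1, hr⟩
          · exact absurd h1 h
      · rintro (h | ⟨h, hr⟩)
        · exact Or.inl h
        · exact Or.inr ⟨by rw [h]; exact lt_irrefl _, hr⟩
    calc (decide (PySem.Str.len a < PySem.Str.len b) ||
            (!decide (PySem.Str.len b < PySem.Str.len a) && decide (a < b)))
        = decide (PySem.Str.len a < PySem.Str.len b ∨
            (¬ PySem.Str.len b < PySem.Str.len a ∧ a < b)) := by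
          simp [← decide_not, not_lt]
      _ = decide (pvKey a < pvKey b) := decide_eq_decide.mpr hiff
  show names.foldl (fun acc x => PySem.List.insertBy
      (fun a b : String =>
        decide (PySem.Str.len a < PySem.Str.len b) ||
          (!decide (PySem.Str.len b < PySem.Str.len a) && decide (a < b))) x acc) []
    = PySem.List.sorted names pvKey false
  rw [PySem.List.sorted_eq_foldl_insertBy, hfun]

-- counting lemma for the grouping
lemma count_flat_filter (f : String → Int) (names : List String) (ks : List Int)
    (hnd : ks.Nodup) (x : String) :
    (ks.flatMap (fun k => names.filter (fun n => f n == k))).count x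
      = if f x ∈ ks then names.count x else 0 := by
  induction ks with
  | nil => simp
  | cons k t ih =>
    have hnd' : t.Nodup := hnd.of_cons
    by_cases h : f x = k
    · have hk : k ∉ t := (List.nodup_cons.mp hnd).1
      simp [List.count_append, List.count_filter, h, ih hnd', hk]
    · have h0 : x ∉ names.filter (fun n => f n == k) := by
        intro hx
        exact h (by simpa using (List.mem_filter.mp hx).2)
      simp [List.count_append, List.count_eq_zero.mpr h0, ih hnd', List.mem_cons, h]

lemma flatMap_perm_congr {α β : Type} (l : List α) (f g : α → List β)
    (h : ∀ a ∈ l, (f a).Perm (g a)) : (l.flatMap f).Perm (l.flatMap g) := by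
  induction l with
  | nil => simp
  | cons a t ih =>
    simp only [List.flatMap_cons]
    exact (h a (by simp)).append (ih (fun a ha => h a (by simp [ha])))

-- A's port is also the stable sort by pvKey
lemma a_eq_sorted (names : List String) :
    sort_by_len_alphabet names = PySem.List.sorted names pvKey false := by
  -- unfold A (lets reduce definitionally)
  show (PySem.List.sorted
      (names.foldl (fun d name =>
        if d.contains (PySem.Str.len name) = false then
          d.insert (PySem.Str.len name) [name]
        else
          d.modify (PySem.Str.len name) [] (fun l => l ++ [name])) PySem.Dict.empty).items
      (fun p => p.1) false).foldl
      (fun result t => result ++ PySem.List.sorted t.2 (fun s => s) false) []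
    = PySem.List.sorted names pvKey false
  -- the branched update is exactly a modify
  have hstep : ∀ (d : PySem.Dict Int (List String)) (n : String),
      (if d.contains (PySem.Str.len n) = false then d.insert (PySem.Str.len n) [n]
       else d.modify (PySem.Str.len n) [] (fun l => l ++ [n]))
      = d.modify (PySem.Str.len n) [] (fun l => l ++ [n]) := by
    intro d n
    by_cases h : d.contains (PySem.Str.len n) = false
    · rw [if_pos h]
      unfold PySem.Dict.modify
      rw [PySem.Dict.getD_of_not_contains d [] h]
      simp
    · rw [if_neg h]
  have hstepf : (fun (d : PySem.Dict Int (List String)) name =>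
      if d.contains (PySem.Str.len name) = false then d.insert (PySem.Str.len name) [name]
      else d.modify (PySem.Str.len name) [] (fun l => l ++ [name]))
      = (fun (d : PySem.Dict Int (List String)) n =>
          d.modify (PySem.Str.len n) [] (fun l => l ++ [n])) :=
    funext fun d => funext fun n => hstep d n
  rw [hstepf]
  have hfold : names.foldl (fun (d : PySem.Dict Int (List String)) n =>
        d.modify (PySem.Str.len n) [] (fun l => l ++ [n])) PySem.Dict.empty
      = (names.map (fun n => (PySem.Str.len n, n))).foldl
          (fun d p => d.modify p.1 [] (fun l => l ++ [p.2])) PySem.Dict.empty := by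
    rw [List.foldl_map]
  rw [hfold]
  set l' := names.map (fun n => (PySem.Str.len n, n)) with hl'
  set D := l'.foldl (fun (d : PySem.Dict Int (List String)) p =>
      d.modify p.1 [] (fun l => l ++ [p.2])) PySem.Dict.empty with hD
  have hkeys : D.keys = PySem.Set.ofList (l'.map (fun p => p.1)) := by
    rw [hD, PySem.Dict.keys_foldl_modify_key]
    simp [PySem.Set.update_nil_left]
  have hnd : D.keys.Nodup := by
    rw [hkeys]; exact PySem.Set.nodup_ofList _
  have hbucket : ∀ c, D.getD c [] = names.filter (fun n => PySem.Str.len n == c) := by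
    intro c
    rw [hD, PySem.Dict.getD_foldl_modify_append]
    simp [hl', List.filter_map, List.map_map, Function.comp_def]
  have hitems : D.items = D.keys.map (fun k => (k, names.filter (fun n => PySem.Str.len n == k))) := by
    rw [PySem.Dict.items_eq_map_keys D hnd ([] : List String)]
    exact List.map_congr_left (fun k _ => by rw [hbucket])
  -- name the sorted key list
  set sk := PySem.List.sorted D.keys (fun x => x) false with hsk
  have hskperm : sk.Perm D.keys := PySem.List.sorted_perm _ _ _
  have hsklt : sk.Pairwise (· < ·) := by
    rw [hsk, hkeys]; exact PySem.List.sorted_ofList_pairwise_lt _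
  have hsknd : sk.Nodup := hskperm.nodup_iff.mpr hnd
  -- sorted(items) is sk mapped through the bucket builder
  have hst : PySem.List.sorted D.items (fun p => p.1) false
      = sk.map (fun k => (k, names.filter (fun n => PySem.Str.len n == k))) := by
    apply PySem.List.sorted_eq_of_perm_of_pairwise_lt
    · rw [hitems]; exact hskperm.map _
    · exact List.pairwise_map.mpr (hsklt.imp (fun h => h))
  rw [hst]
  rw [PySem.List.foldl_append_eq_flatMap]
  rw [List.flatMap_map]
  simp only [List.nil_append]
  -- elements of bucket k have length k
  have hlen : ∀ (k : Int) (s : String),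
      s ∈ PySem.List.sorted (names.filter (fun n => PySem.Str.len n == k)) (fun s => s) false →
      PySem.Str.len s = k := by
    intro k s hs
    have := (PySem.List.mem_sorted _ _ _ _).mp hs
    simpa using (List.mem_filter.mp this).2
  apply PySem.List.eq_of_perm_of_pairwise_le_of_injective pvKey pvKey_inj
  · -- permutation
    have h1 : (sk.flatMap (fun k =>
        PySem.List.sorted (names.filter (fun n => PySem.Str.len n == k)) (fun s => s) false)).Perm
        (sk.flatMap (fun k => names.filter (fun n => PySem.Str.len n == k))) :=
      flatMap_perm_congr _ _ _ (fun k _ => PySem.List.sorted_perm _ _ _)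
    have hcov : ∀ n ∈ names, PySem.Str.len n ∈ sk := by
      intro n hn
      rw [hsk, PySem.List.mem_sorted, hkeys, PySem.Set.mem_ofList]
      exact List.mem_map.mpr ⟨(PySem.Str.len n, n), List.mem_map.mpr ⟨n, hn, rfl⟩, rfl⟩
    have h2 : (sk.flatMap (fun k => names.filter (fun n => PySem.Str.len n == k))).Perm names := by
      rw [List.perm_iff_count]
      intro x
      rw [count_flat_filter _ _ _ hsknd]
      by_cases hx : PySem.Str.len x ∈ sk
      · rw [if_pos hx]
      · have hxn : x ∉ names := fun hmem => hx (hcov x hmem)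
        rw [if_neg hx]
        exact (List.count_eq_zero.mpr hxn).symm
    exact (h1.trans h2).trans (PySem.List.sorted_perm names pvKey false).symm
  · -- left side pairwise
    rw [List.flatMap_def]
    apply List.pairwise_flatten.mpr
    constructor
    · intro l hl
      obtain ⟨k, hk, rfl⟩ := List.mem_map.mp hl
      have hp := PySem.List.sorted_pairwise (names.filter (fun n => PySem.Str.len n == k)) (fun s => s)
      refine hp.imp_of_mem ?_
      intro a b ha hb hab
      exact Prod.Lex.toLex_le_toLex.mpr (Or.inr ⟨by rw [hlen k a ha, hlen k b hb], hab⟩)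
    · apply List.pairwise_map.mpr
      refine hsklt.imp ?_
      intro k1 k2 hk x hx y hy
      exact le_of_lt (Prod.Lex.toLex_lt_toLex.mpr (Or.inl (by rw [hlen k1 x hx, hlen k2 y hy]; exact hk)))
  · exact PySem.List.sorted_pairwise names pvKey

-- ===== VERDICT (by name: the statement is the Claim_ definition above) =====
theorem sort_by_len_alphabet_spec : Claim_equal_sort_by_len_alphabet := by
  intro names _
  unfold Spec_sort_by_len_alphabet
  rw [alt_eq_sorted, a_eq_sorted]
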